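-- pv_equiv track=rewrite | github.com/kryonlabs/kryon | tests/utils/debug_helper.py | _extract_minimal_components
-- ===== SOURCE A (Python) =====
-- def _extract_minimal_components(content: str) -> str:
--     """Extract minimal components from a KRY file"""
--     lines = content.split('\n')
--
--     # Essential components for a minimal test
--     minimal_lines = [
--         "# Minimal test case generated by debug helper",
--         "",
--         "App {",
--         "    window_width: 400",
--         "    window_height: 300",
--         "    window_title: \"Debug Test\"",
--         "",
--         "    Text {",
--         "        text: \"Test\"",
--         "    }",
--         "}"
--     ]
--
--     # Try to preserve any variables that might be causing issues
--     in_variables = False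
--     for line in lines:
--         line = line.strip()
--
--         if line.startswith('@variables'):
--             in_variables = True
--             minimal_lines.insert(-5, "")
--             minimal_lines.insert(-5, "@variables {")
--             continue
--         elif in_variables and line == '}':
--             in_variables = False
--             minimal_lines.insert(-5, "}")
--             continue
--         elif in_variables and line:
--             minimal_lines.insert(-5, f"    {line}")
--
--     return '\n'.join(minimal_lines)
-- ===== SOURCE B (Python) =====
-- HEADER = ("# Minimal test case generated by debug helper\n"
--           "\n"
--           "App {\n"
--           "    window_width: 400\n"
--           "    window_height: 300\n"
--           "    window_title: \"Debug Test\"")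
--
-- FOOTER = ("\n"
--           "\n"
--           "    Text {\n"
--           "        text: \"Test\"\n"
--           "    }\n"
--           "}")
--
--
-- def _extract_minimal_components(content: str) -> str:
--     """Extract minimal components from a KRY file"""
--     stripped = [l.strip() for l in content.split('\n')]
--
--     # pass 1: prefix-scan of the in-variables flag (state *before* each line)
--     flags = []
--     s = False
--     for l in stripped:
--         flags.append(s)
--         if l.startswith('@variables'):
--             s = True
--         elif s and l == '}':
--             s = False
--
--     # pass 2: stateless per-line fragments, spliced into the fixed template string
--     pieces = []
--     for s, l in zip(flags, stripped):
--         if l.startswith('@variables'):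
--             pieces.append('\n\n@variables {')
--         elif s and l == '}':
--             pieces.append('\n}')
--         elif s and l:
--             pieces.append('\n    ' + l)
--     return HEADER + ''.join(pieces) + FOOTER
-- ===== Notes on version B (the rewrite author's own statement) =====
-- stated objective: simpler
-- what changed: B replaces A's single stateful loop that mutates one template list with repeated insert(-5) by staged passes: strip all lines, prefix-scan the in-variables flag into a list, then map each (flag, line) pair to a stateless string fragment and splice the concatenation between fixed header and footer strings.
import Mathlib
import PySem

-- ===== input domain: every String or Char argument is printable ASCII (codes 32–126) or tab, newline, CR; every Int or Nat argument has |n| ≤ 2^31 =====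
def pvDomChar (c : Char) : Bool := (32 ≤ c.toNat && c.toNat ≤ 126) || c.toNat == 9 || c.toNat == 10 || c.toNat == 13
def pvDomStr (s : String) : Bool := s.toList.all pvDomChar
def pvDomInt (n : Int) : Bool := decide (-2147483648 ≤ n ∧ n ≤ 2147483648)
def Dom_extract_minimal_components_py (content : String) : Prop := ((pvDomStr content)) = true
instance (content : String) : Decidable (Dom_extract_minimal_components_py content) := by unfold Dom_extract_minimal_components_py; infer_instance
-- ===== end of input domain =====

-- B replaces A's single stateful loop mutating one list with insert(-5) by staged passes:
-- a prefix-scan of the flag, then a stateless per-line fragment map spliced as plain strings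
-- between a fixed header and footer string; objective: simpler (no speed claim).

-- ===== PORT A =====
-- A's fixed 11-line template, as lines (List Char each)
def pvMinimalInit : List (List Char) :=
  [ "# Minimal test case generated by debug helper".toList,
    "".toList,
    "App {".toList,
    "    window_width: 400".toList,
    "    window_height: 300".toList,
    "    window_title: \"Debug Test\"".toList,
    "".toList,
    "    Text {".toList,
    "        text: \"Test\"".toList,
    "    }".toList,
    "}".toList ]

-- one iteration of A's for-loop: state = (in_variables, minimal_lines)
def pvA_step (s : Bool × List (List Char)) (raw : List Char) : Bool × List (List Char) :=
  let line := PySem.Chars.strip raw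
  if PySem.Chars.startswith line "@variables".toList then
    (true, PySem.List.insert (PySem.List.insert s.2 (-5) "".toList) (-5) "@variables {".toList)
  else if s.1 && (line == "}".toList) then
    (false, PySem.List.insert s.2 (-5) "}".toList)
  else if s.1 && !(line == "".toList) then
    (s.1, PySem.List.insert s.2 (-5) ("    ".toList ++ line))
  else s

def extract_minimal_components_py (content : String) : String :=
  String.ofList (PySem.Chars.join "\n".toList
    (((PySem.Chars.splitOn content.toList "\n".toList).foldl pvA_step (false, pvMinimalInit)).2))

-- ===== PORT B =====
def pvHeader : List Char :=
  "# Minimal test case generated by debug helper\n\nApp {\n    window_width: 400\n    window_height: 300\n    window_title: \"Debug Test\"".toList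

def pvFooter : List Char :=
  "\n\n    Text {\n        text: \"Test\"\n    }\n}".toList

-- pass 1 of Source B: the flag *before* each (already stripped) line, as a prefix scan
def pvFlags : List (List Char) → Bool → List Bool
  | [], _ => []
  | l :: ls, s =>
    s :: pvFlags ls (if PySem.Chars.startswith l "@variables".toList then true
                     else if s && (l == "}".toList) then false else s)

-- pass 2 of Source B: the string fragment contributed by one (flag, stripped line) pair
def pvEmit (p : Bool × List Char) : List Char :=
  if PySem.Chars.startswith p.2 "@variables".toList then "\n\n@variables {".toList
  else if p.1 && (p.2 == "}".toList) then "\n}".toList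
  else if p.1 && !(p.2 == "".toList) then '\n' :: ("    ".toList ++ p.2)
  else []

def extract_minimal_components_py_alt (content : String) : String :=
  let stripped := (PySem.Chars.splitOn content.toList "\n".toList).map PySem.Chars.strip
  String.ofList (pvHeader ++ (((pvFlags stripped false).zip stripped).map pvEmit).flatten ++ pvFooter)

-- ===== PRECONDITION & SPEC =====
def Spec_extract_minimal_components_py (content : String) (out : String) : Prop := out = extract_minimal_components_py_alt content
instance (content : String) (out : String) : Decidable (Spec_extract_minimal_components_py content out) := by unfold Spec_extract_minimal_components_py; infer_instance

-- ===== CLAIM =====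
def Claim_equal_extract_minimal_components_py : Prop := ∀ (content : String), Dom_extract_minimal_components_py content → Spec_extract_minimal_components_py content (extract_minimal_components_py content)

-- ===== LEMMAS AND PROOFS =====

-- the block lines A inserts before the 5-line tail, as a recursion over the raw lines
def pvE : Bool → List (List Char) → List (List Char)
  | _, [] => []
  | b, raw :: rest =>
    let l := PySem.Chars.strip raw
    if PySem.Chars.startswith l "@variables".toList then
      "".toList :: "@variables {".toList :: pvE true rest
    else if b && (l == "}".toList) then "}".toList :: pvE false rest
    else if b && !(l == "".toList) then ("    ".toList ++ l) :: pvE b rest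
    else pvE b rest

-- the final flag of A's loop from initial flag b
def pvS : Bool → List (List Char) → Bool
  | b, [] => b
  | b, raw :: rest =>
    let l := PySem.Chars.strip raw
    pvS (if PySem.Chars.startswith l "@variables".toList then true
         else if b && (l == "}".toList) then false else b) rest

def pvFront : List (List Char) :=
  [ "# Minimal test case generated by debug helper".toList,
    "".toList,
    "App {".toList,
    "    window_width: 400".toList,
    "    window_height: 300".toList,
    "    window_title: \"Debug Test\"".toList ]

def pvTail : List (List Char) :=
  [ "".toList,
    "    Text {".toList,
    "        text: \"Test\"".toList,
    "    }".toList,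
    "}".toList ]

-- A's insert(-5) into front ++ acc ++ tail (front has 6 lines, tail 5) appends to acc
lemma pv_ins5 (acc : List (List Char)) (x : List Char) :
    PySem.List.insert (pvFront ++ (acc ++ pvTail)) (-5) x = pvFront ++ (acc ++ x :: pvTail) := by
  have hk : (max (-5 + ((pvFront.length : Int) + ((acc.length : Int) + (pvTail.length : Int)))) 0).toNat
      = pvFront.length + acc.length := by
    rw [show pvFront.length = 6 from by decide, show pvTail.length = 5 from by decide]; omega
  simp only [PySem.List.insert, PySem.List.sliceIndices]
  norm_num
  rw [hk, List.take_append, List.drop_append]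
  have h1 : List.take acc.length (acc ++ pvTail) = acc := by simp
  have h2 : List.drop acc.length (acc ++ pvTail) = pvTail := by simp
  simp [h1, h2, List.take_of_length_le, List.drop_eq_nil_of_le]

-- loop invariant of A: the list state is front ++ (acc ++ block lines) ++ tail
lemma pv_invA (ls : List (List Char)) (b : Bool) (acc : List (List Char)) :
    ls.foldl pvA_step (b, pvFront ++ acc ++ pvTail)
      = (pvS b ls, pvFront ++ (acc ++ pvE b ls) ++ pvTail) := by
  induction ls generalizing b acc with
  | nil => simp [pvS, pvE]
  | cons raw rest ih =>
    simp only [List.foldl_cons, pvA_step, pvS, pvE]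
    split_ifs with h1 h2 h3 <;> simp only [List.append_assoc] at *
    · rw [pv_ins5 acc "".toList,
          show acc ++ "".toList :: pvTail = (acc ++ ["".toList]) ++ pvTail from by simp,
          pv_ins5 (acc ++ ["".toList]) "@variables {".toList,
          show (acc ++ ["".toList]) ++ "@variables {".toList :: pvTail
              = (acc ++ ["".toList, "@variables {".toList]) ++ pvTail from by simp,
          ih]
      simp
    · rw [pv_ins5 acc "}".toList,
          show acc ++ "}".toList :: pvTail = (acc ++ ["}".toList]) ++ pvTail from by simp,
          ih]
      simp
    · rw [pv_ins5 acc ("    ".toList ++ PySem.Chars.strip raw),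
          show acc ++ ("    ".toList ++ PySem.Chars.strip raw) :: pvTail
              = (acc ++ [("    ".toList ++ PySem.Chars.strip raw)]) ++ pvTail from by simp,
          ih]
      simp
    · rw [ih]

-- B's zip/map pass equals the block lines each prefixed by a newline
lemma pv_invB (ls : List (List Char)) (b : Bool) :
    (((pvFlags (ls.map PySem.Chars.strip) b).zip (ls.map PySem.Chars.strip)).map pvEmit).flatten
      = ((pvE b ls).map (List.cons '
')).flatten := by
  induction ls generalizing b with
  | nil => simp [pvFlags, pvE]
  | cons raw rest ih =>
    by_cases h1 : PySem.Chars.startswith (PySem.Chars.strip raw) ['@','v','a','r','i','a','b','l','e','s'] = true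
    · simp [pvFlags, pvE, pvEmit, h1, ih]
    · by_cases hb : b = true
      · by_cases h2 : PySem.Chars.strip raw = ['}']
        · simp only [h2] at h1
          simp [pvFlags, pvE, pvEmit, h1, h2, hb, ih]
        · by_cases h3 : PySem.Chars.strip raw = ([] : List Char)
          · simp only [h3] at h1
            simp [pvFlags, pvE, pvEmit, h1, h3, hb, ih]
          · simp [pvFlags, pvE, pvEmit, h1, h2, h3, hb, ih]
      · have hb' : b = false := by simpa using hb
        subst hb'
        simp [pvFlags, pvE, pvEmit, h1, ih]

lemma pv_inter (sep : List Char) (x : List Char) (xs : List (List Char)) :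
    List.intercalate sep (x :: xs) = x ++ (xs.map (sep ++ ·)).flatten := by
  induction xs generalizing x with
  | nil => simp [List.intercalate]
  | cons y ys ih => simp [List.intercalate] at ih ⊢; simp [ih]

-- joining front ++ mid ++ tail with '\n' = header ++ newline-prefixed mid ++ footer
lemma pv_join (mid : List (List Char)) :
    PySem.Chars.join "\n".toList (pvFront ++ mid ++ pvTail)
      = pvHeader ++ (mid.map (List.cons '\n')).flatten ++ pvFooter := by
  have h0 : pvFront ++ mid ++ pvTail
      = "# Minimal test case generated by debug helper".toList :: (pvFront.tail ++ mid ++ pvTail) := by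
    simp [pvFront]
  rw [PySem.Chars.join, h0, pv_inter]
  simp [pvFront, pvTail, pvHeader, pvFooter]

lemma pv_init : pvMinimalInit = pvFront ++ [] ++ pvTail := by decide

-- ===== VERDICT =====
theorem extract_minimal_components_py_spec : Claim_equal_extract_minimal_components_py := by
  intro content _
  unfold Spec_extract_minimal_components_py extract_minimal_components_py extract_minimal_components_py_alt
  rw [pv_init, pv_invA, pv_join]
  simp only [List.nil_append]
  rw [← pv_invB]
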